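-- pv_equiv track=rewrite | github.com/rogerfiske/c5_multi_location | scripts/recency_exclusion_baseline.py | generate_set_from_scores
-- ===== SOURCE A (Python) =====
-- def generate_set_from_scores(scores):
--     """Generate valid ascending 5-part set from scores"""
--     ranked = sorted(scores.items(), key=lambda x: -x[1])
--
--     selected = []
--     for part_id, score in ranked:
--         if len(selected) == 5:
--             break
--         if not selected or part_id > max(selected):
--             selected.append(part_id)
--         elif part_id < min(selected):
--             selected.insert(0, part_id)
--         else:
--             for i in range(len(selected)):
--                 if i == 0 and part_id < selected[i]:
--                     selected.insert(0, part_id)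
--                     break
--                 elif i > 0 and selected[i-1] < part_id < selected[i]:
--                     selected.insert(i, part_id)
--                     break
--         if len(selected) > 5:
--             selected = sorted(selected)[:5]
--
--     # Fill if needed
--     if len(selected) < 5:
--         remaining = [p for p in range(1, 40) if p not in selected]
--         for p in remaining:
--             if not selected or p > selected[-1]:
--                 selected.append(p)
--             if len(selected) == 5:
--                 break
--
--     return tuple(sorted(selected)[:5])
-- ===== SOURCE B (Python) =====
-- def generate_set_from_scores(scores):
--     """Generate valid ascending 5-part set from scores.
--
--     Rewrite: take the top-5 ranked keys by a slice and one ascending sort,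
--     and replace the fill loop by closed-form range arithmetic."""
--     ranked = sorted(scores.items(), key=lambda x: -x[1])
--     selected = sorted(p for p, _ in ranked[:5])
--     if len(selected) < 5:
--         start = selected[-1] + 1 if selected else 1
--         if start < 1:
--             start = 1
--         stop = min(40, start + 5 - len(selected))
--         selected.extend(range(start, stop))
--     return tuple(selected)
-- ===== Notes on version B (the rewrite author's own statement) =====
-- stated objective: simpler
-- what changed: Replaces A's branchy incremental sorted-insertion loop (append/prepend/scan-for-slot with max/min probes) by a slice-and-sort of the top-5 ranked keys, and replaces the fill scan over range(1,40) with per-element membership tests by closed-form range arithmetic.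
import Mathlib
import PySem

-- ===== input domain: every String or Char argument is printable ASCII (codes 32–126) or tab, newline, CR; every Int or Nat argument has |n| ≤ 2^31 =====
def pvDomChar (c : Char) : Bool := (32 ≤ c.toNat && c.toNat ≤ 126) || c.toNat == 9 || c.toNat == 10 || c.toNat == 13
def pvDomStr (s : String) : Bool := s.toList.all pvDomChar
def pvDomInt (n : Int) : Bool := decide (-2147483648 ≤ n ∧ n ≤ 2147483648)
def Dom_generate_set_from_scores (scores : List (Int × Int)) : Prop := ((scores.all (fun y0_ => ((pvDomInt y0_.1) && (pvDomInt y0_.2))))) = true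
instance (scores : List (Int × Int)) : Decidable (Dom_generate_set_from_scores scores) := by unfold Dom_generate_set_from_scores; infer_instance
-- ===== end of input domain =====

-- B changes the selection to slice-and-sort and the fill loop to closed-form range arithmetic (simpler; same asymptotics).

-- ===== PORT A =====

-- inner 'for i in range(len(selected))' loop of A; sel.getD is in range at every
-- evaluated position (guarded by i < sel.length and 0 < i), so it is exact
def pvInnerIns (pid : Int) (sel : List Int) (i : Nat) : List Int :=
  if i < sel.length then
    if i == 0 && decide (pid < sel.getD i 0) then
      PySem.List.insert sel 0 pid
    else if decide (0 < i) && decide (sel.getD (i - 1) 0 < pid) && decide (pid < sel.getD i 0) then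
      PySem.List.insert sel (i : Int) pid
    else pvInnerIns pid sel (i + 1)
  else sel
termination_by sel.length - i

-- the body of A's main 'for part_id, score in ranked' iteration (after the len==5 break check);
-- max(selected)/min(selected) are evaluated only on nonempty sel (short-circuit), so .getD 0 is exact
def pvIns (pid : Int) (sel : List Int) : List Int :=
  if sel.isEmpty || decide ((PySem.List.max? sel (fun y => y)).getD 0 < pid) then
    sel ++ [pid]
  else if decide (pid < (PySem.List.min? sel (fun y => y)).getD 0) then
    PySem.List.insert sel 0 pid
  else pvInnerIns pid sel 0

def pvSelLoop : List (Int × Int) → List Int → List Int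
  | [], sel => sel
  | (pid, _s) :: rest, sel =>
    if sel.length == 5 then sel
    else
      let sel1 := pvIns pid sel
      let sel2 := if 5 < sel1.length then
          PySem.List.slice (PySem.List.sorted sel1 (fun y => y) false) none (some 5)
        else sel1
      pvSelLoop rest sel2

-- A's fill loop; selected[-1] is pyGetD sel (-1) 0, evaluated only on nonempty sel (short-circuit)
def pvFillLoop : List Int → List Int → List Int
  | [], sel => sel
  | p :: rest, sel =>
    let sel1 := if sel.isEmpty || decide (PySem.List.pyGetD sel (-1) 0 < p) then sel ++ [p] else sel
    if sel1.length == 5 then sel1 else pvFillLoop rest sel1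

def generate_set_from_scores (scores : List (Int × Int)) : List Int :=
  let ranked := PySem.List.sorted (PySem.Dict.ofList scores).items (fun x => -x.2) false
  let selected := pvSelLoop ranked []
  let selected :=
    if selected.length < 5 then
      let remaining := (PySem.List.pyRange 1 40 1).filter (fun p => !(selected.contains p))
      pvFillLoop remaining selected
    else selected
  PySem.List.slice (PySem.List.sorted selected (fun y => y) false) none (some 5)

-- ===== PORT B =====

def generate_set_from_scores_alt (scores : List (Int × Int)) : List Int :=
  let ranked := PySem.List.sorted (PySem.Dict.ofList scores).items (fun x => -x.2) false
  let selected := PySem.List.sorted ((PySem.List.slice ranked none (some 5)).map (·.1)) (fun y => y) false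
  if selected.length < 5 then
    let start0 := if selected.isEmpty then 1 else PySem.List.pyGetD selected (-1) 0 + 1
    let start := if start0 < 1 then 1 else start0
    let stop := min 40 (start + 5 - (selected.length : Int))
    selected ++ PySem.List.pyRange start stop 1
  else selected

-- ===== PRECONDITION & SPEC =====
def Spec_generate_set_from_scores (scores : List (Int × Int)) (out : List Int) : Prop := out = generate_set_from_scores_alt scores
instance (scores : List (Int × Int)) (out : List Int) : Decidable (Spec_generate_set_from_scores scores out) := by unfold Spec_generate_set_from_scores; infer_instance

-- ===== CLAIM (what is proved, stated in full; the proofs are below) =====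
def Claim_equal_generate_set_from_scores : Prop := ∀ (scores : List (Int × Int)), Dom_generate_set_from_scores scores → Spec_generate_set_from_scores scores (generate_set_from_scores scores)

-- ===== LEMMAS AND PROOFS =====

-- every element of a strictly sorted list is ≤ its last element
theorem pv_le_getLast {l : List Int} (h : l.Pairwise (· < ·)) {y : Int} (hy : y ∈ l) :
    y ≤ (l.getLast?).getD 0 := by
  induction l with
  | nil => cases hy
  | cons x xs ih =>
    rcases List.pairwise_cons.mp h with ⟨hx, hxs⟩
    cases xs with
    | nil => simp at hy ⊢; omega
    | cons b bs =>
      rw [List.getLast?_cons_cons]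
      rcases List.mem_cons.mp hy with rfl | hy'
      · have hlt := hx _ (List.getLast_mem (l := b :: bs) (by simp))
        rw [List.getLast?_eq_some_getLast (by simp)]
        simpa using le_of_lt hlt
      · exact ih hxs hy'

theorem pv_filter_pyRange (L a b : Int) :
    (PySem.List.pyRange a b 1).filter (fun p => decide (L < p)) =
      PySem.List.pyRange (max (L + 1) a) b 1 := by
  by_cases hab : b ≤ a
  · rw [PySem.List.pyRange_one_eq_nil hab, PySem.List.pyRange_one_eq_nil (by omega)]
    rfl
  · rw [Int.not_le] at hab
    rw [PySem.List.pyRange_one_cons hab]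
    by_cases hL : L < a
    · have hmax : max (L+1) a = a := by omega
      rw [hmax, PySem.List.pyRange_one_cons hab]
      have := pv_filter_pyRange L (a+1) b
      have h2 : max (L+1) (a+1) = a+1 := by omega
      rw [h2] at this
      simp [hL, this]
    · have h2 : max (L+1) a = max (L+1) (a+1) := by omega
      have := pv_filter_pyRange L (a+1) b
      simp only [List.filter_cons, decide_eq_true_eq, hL]
      rw [this, h2]
      simp
termination_by (b - a).toNat
decreasing_by all_goals omega

theorem pv_take_pyRange (a b : Int) (k : Nat) :
    (PySem.List.pyRange a b 1).take k = PySem.List.pyRange a (min b (a + (k : Int))) 1 := by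
  induction k generalizing a with
  | zero => rw [PySem.List.pyRange_one_eq_nil (show min b (a + ((0:Nat) : Int)) ≤ a by omega)]; simp
  | succ n ih =>
    by_cases hab : b ≤ a
    · rw [PySem.List.pyRange_one_eq_nil hab, PySem.List.pyRange_one_eq_nil (by omega)]
      simp
    · rw [Int.not_le] at hab
      rw [PySem.List.pyRange_one_cons hab, List.take_succ_cons, ih (a+1),
        PySem.List.pyRange_one_cons (show a < min b (a + ((n+1:Nat) : Int)) by push_cast; omega)]
      congr 2
      push_cast
      omega

theorem pvInnerIns_spec (pid : Int) (sel : List Int) (h : sel.Pairwise (· < ·)) (hn : pid ∉ sel)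
    (i : Nat) (hpre : ∀ j (hj : j < sel.length), j < i → sel[j] < pid)
    (hex : ∃ j, ∃ hj : j < sel.length, pid < sel[j]) :
    (pvInnerIns pid sel i).Perm (pid :: sel) ∧ (pvInnerIns pid sel i).Pairwise (· < ·) := by
  have hord := List.pairwise_iff_getElem.mp h
  rw [pvInnerIns]
  by_cases hi : i < sel.length
  · rw [if_pos hi, List.getD_eq_getElem sel 0 hi]
    by_cases hc1 : i = 0 ∧ pid < sel[i]
    · obtain ⟨hi0, hlt⟩ := hc1
      rw [if_pos (by subst hi0; simp [hlt])]
      rw [PySem.List.insert_zero]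
      refine ⟨List.Perm.refl _, List.pairwise_cons.mpr ⟨?_, h⟩⟩
      intro y hy
      rcases List.mem_iff_getElem.mp hy with ⟨j, hj, rfl⟩
      subst hi0
      rcases Nat.eq_zero_or_pos j with rfl | hj0
      · exact hlt
      · exact lt_trans hlt (hord 0 j (by omega) hj (by omega))
    · rw [if_neg (by
        intro hcc
        simp only [Bool.and_eq_true, beq_iff_eq, decide_eq_true_eq] at hcc
        exact hc1 hcc)]
      by_cases hc2 : 0 < i ∧ pid < sel[i]
      · obtain ⟨hi0, hlt⟩ := hc2
        have hprev : sel[i-1]'(by omega) < pid := hpre (i-1) (by omega) (by omega)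
        rw [if_pos (by
          rw [List.getD_eq_getElem sel 0 (show i - 1 < sel.length by omega)]
          simp [hi0, hprev, hlt])]
        rw [PySem.List.insert_natCast sel i pid (le_of_lt hi)]
        constructor
        · have hp := @List.perm_middle _ pid (sel.take i) (sel.drop i)
          rwa [List.take_append_drop] at hp
        · refine List.pairwise_append.mpr ⟨List.Pairwise.sublist (List.take_sublist i sel) h, ?_, ?_⟩
          · refine List.pairwise_cons.mpr ⟨?_, List.Pairwise.sublist (List.drop_sublist i sel) h⟩
            intro y hy
            rcases List.mem_iff_getElem.mp hy with ⟨t, ht, rfl⟩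
            rw [List.getElem_drop]
            rcases Nat.eq_zero_or_pos t with rfl | ht0
            · simpa using hlt
            · exact lt_trans hlt (hord i (i+t) hi (by simp at ht; omega) (by omega))
          · intro a ha b hb
            rcases List.mem_iff_getElem.mp ha with ⟨j, hj, rfl⟩
            rw [List.getElem_take] at *
            have hjlen : j < sel.length := by simp at hj; omega
            have hji : j < i := by simp at hj; omega
            rcases List.mem_cons.mp hb with rfl | hb'
            · exact hpre j hjlen hji
            · rcases List.mem_iff_getElem.mp hb' with ⟨t, ht, rfl⟩
              rw [List.getElem_drop]
              exact hord j (i+t) hjlen (by simp at ht; omega) (by omega)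
      · have hne : sel[i] ≠ pid := fun he => hn (he ▸ List.getElem_mem hi)
        have hgt : sel[i] < pid := by
          rcases lt_trichotomy pid sel[i] with hl | he | hg
          · exfalso
            rcases Nat.eq_zero_or_pos i with rfl | hi0
            · exact hc1 ⟨rfl, hl⟩
            · exact hc2 ⟨hi0, hl⟩
          · exact absurd he.symm hne
          · exact hg
        rw [if_neg (by
          simp only [Bool.and_eq_true, decide_eq_true_eq]
          rintro ⟨⟨hi0, -⟩, hlt⟩
          exact absurd hlt (by omega))]
        exact pvInnerIns_spec pid sel h hn (i+1)
          (fun j hj hji => by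
            rcases Nat.lt_succ_iff_lt_or_eq.mp hji with hji' | rfl
            · exact hpre j hj hji'
            · exact hgt)
          hex
  · exfalso
    rcases hex with ⟨j, hj, hlt⟩
    have := hpre j hj (by omega)
    omega
termination_by sel.length - i

theorem pvIns_spec (pid : Int) (sel : List Int) (h : sel.Pairwise (· < ·)) (hn : pid ∉ sel) :
    (pvIns pid sel).Perm (pid :: sel) ∧ (pvIns pid sel).Pairwise (· < ·) := by
  unfold pvIns
  cases hsel : sel with
  | nil => simp
  | cons x xs =>
    rw [← hsel]
    have hne : sel ≠ [] := by rw [hsel]; simp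
    obtain ⟨m, hm⟩ : ∃ m, PySem.List.max? sel (fun y => y) = some m := by
      cases hmm : PySem.List.max? sel (fun y => y) with
      | none => exact absurd ((PySem.List.max?_eq_none_iff sel _).mp hmm) hne
      | some m => exact ⟨m, rfl⟩
    obtain ⟨m2, hm2⟩ : ∃ m2, PySem.List.min? sel (fun y => y) = some m2 := by
      cases hmm : PySem.List.min? sel (fun y => y) with
      | none => exact absurd ((PySem.List.min?_eq_none_iff sel _).mp hmm) hne
      | some m => exact ⟨m, rfl⟩
    have hmmem := PySem.List.max?_mem hm
    have hmmax := PySem.List.max?_isMax hm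
    have hmin := PySem.List.min?_isMin hm2
    rw [hm, hm2]
    simp only [Option.getD_some]
    by_cases hmax : m < pid
    · rw [if_pos (by simp [hmax])]
      refine ⟨List.perm_append_singleton pid sel, List.pairwise_append.mpr ⟨h, by simp, ?_⟩⟩
      intro a ha b hb
      simp at hb
      subst hb
      exact lt_of_le_of_lt (hmmax a ha) hmax
    · rw [if_neg (by simp [hsel, hmax])]
      have hpm : pid < m := by
        rcases lt_trichotomy pid m with hl | rfl | hg
        · exact hl
        · exact absurd hmmem hn
        · exact absurd hg hmax
      by_cases hminlt : pid < m2
      · rw [if_pos (by simp [hminlt]), PySem.List.insert_zero]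
        refine ⟨List.Perm.refl _, List.pairwise_cons.mpr ⟨?_, h⟩⟩
        intro y hy
        exact lt_of_lt_of_le hminlt (hmin y hy)
      · rw [if_neg (by simp [hminlt])]
        refine pvInnerIns_spec pid sel h hn 0 (by omega) ?_
        rcases List.mem_iff_getElem.mp hmmem with ⟨j, hj, rfl⟩
        exact ⟨j, hj, hpm⟩

theorem pvSelLoop_spec : ∀ (rs : List (Int × Int)) (sel : List Int),
    sel.Pairwise (· < ·) → sel.length ≤ 5 → (rs.map (·.1)).Nodup →
    (∀ p ∈ rs, p.1 ∉ sel) →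
    pvSelLoop rs sel =
      PySem.List.sorted (sel ++ (rs.take (5 - sel.length)).map (·.1)) (fun y => y) false := by
  intro rs
  induction rs with
  | nil =>
    intro sel hp hlen _ _
    simp [pvSelLoop]
    exact (PySem.List.sorted_eq_self_of_pairwise sel _ (hp.imp le_of_lt)).symm
  | cons q rest ih =>
    obtain ⟨pid, s⟩ := q
    intro sel hp hlen hnodup hdisj
    rw [pvSelLoop]
    by_cases h5 : sel.length = 5
    · rw [if_pos (by simp [h5])]
      rw [h5]
      simp
      exact (PySem.List.sorted_eq_self_of_pairwise sel _ (hp.imp le_of_lt)).symm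
    · rw [if_neg (by simp [h5])]
      have hlt5 : sel.length < 5 := by omega
      have hpid : pid ∉ sel := hdisj (pid, s) (by simp)
      obtain ⟨hperm, hpw⟩ := pvIns_spec pid sel hp hpid
      have hlen1 : (pvIns pid sel).length = sel.length + 1 := by
        rw [hperm.length_eq]; simp
      simp only [hlen1]
      rw [if_neg (by omega)]
      have hnd : (((pid, s) :: rest).map (·.1)).Nodup := hnodup
      simp only [List.map_cons] at hnd
      obtain ⟨hhead, htail⟩ := List.nodup_cons.mp hnd
      rw [ih (pvIns pid sel) hpw (by omega) htail
        (by
          intro p hpr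
          rw [hperm.mem_iff]
          intro hmem
          rcases List.mem_cons.mp hmem with he | hmem'
          · exact hhead (he ▸ List.mem_map_of_mem hpr)
          · exact hdisj p (List.mem_cons_of_mem _ hpr) hmem')]
      rw [hlen1]
      have htake : (5 - sel.length) = (5 - (sel.length + 1)) + 1 := by omega
      rw [htake, List.take_succ_cons]
      rw [List.map_cons]
      exact PySem.List.sorted_eq_sorted_of_perm _ _ _ (fun a b hab => hab)
        ((hperm.append_right _).trans List.perm_middle.symm)

theorem pvFillLoop_spec : ∀ (ps : List Int) (sel : List Int),
    ps.Pairwise (· < ·) → (∀ p ∈ ps, 0 < p) → sel.Pairwise (· < ·) → sel.length < 5 →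
    pvFillLoop ps sel =
      sel ++ (ps.filter (fun p => decide ((sel.getLast?).getD 0 < p))).take (5 - sel.length) := by
  intro ps
  induction ps with
  | nil => intro sel _ _ _ _; simp [pvFillLoop]
  | cons p rest ih =>
    intro sel hpw hpos hsp hlen
    obtain ⟨hphead, hprest⟩ := List.pairwise_cons.mp hpw
    have hp0 : 0 < p := hpos p (by simp)
    have hLp : ((sel.getLast?).getD 0 < p) ∨ sel = [] → True := fun _ => trivial
    rw [pvFillLoop]
    by_cases happ : sel = [] ∨ (sel.getLast?).getD 0 < p
    · -- append case
      have hcond : (sel.isEmpty || decide (PySem.List.pyGetD sel (-1) 0 < p)) = true := by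
        rcases happ with rfl | hlt
        · simp
        · rcases hse : sel with _ | ⟨a, as⟩
          · simp
          · rw [← hse]
            have hne : sel ≠ [] := by rw [hse]; simp
            rw [PySem.List.pyGetD_neg_one sel 0 hne]
            rw [List.getLast?_eq_some_getLast hne] at hlt
            simp only [Option.getD_some] at hlt
            simp [hlt]
      rw [hcond]
      simp only [if_true]
      have hLlt : (sel.getLast?).getD 0 < p := by
        rcases happ with rfl | hlt
        · simpa using hp0
        · exact hlt
      -- the filter keeps p, and keeps all of rest (they exceed p)
      have hfilt : (p :: rest).filter (fun q => decide ((sel.getLast?).getD 0 < q)) =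
          p :: rest := by
        rw [List.filter_eq_self]
        intro a ha
        rcases List.mem_cons.mp ha with rfl | ha'
        · simpa using hLlt
        · simp only [decide_eq_true_eq]
          exact lt_trans hLlt (hphead a ha')
      rw [hfilt]
      have hsp1 : (sel ++ [p]).Pairwise (· < ·) := by
        refine List.pairwise_append.mpr ⟨hsp, by simp, ?_⟩
        intro a ha b hb
        simp at hb; subst hb
        exact lt_of_le_of_lt (pv_le_getLast hsp ha) hLlt
      have hlast1 : ((sel ++ [p]).getLast?).getD 0 = p := by simp
      by_cases h5 : sel.length + 1 = 5
      · rw [if_pos (by simp [h5])]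
        have : 5 - sel.length = 1 := by omega
        rw [this]
        simp
      · rw [if_neg (by simp; omega)]
        rw [ih (sel ++ [p]) hprest (fun q hq => hpos q (by simp [hq])) hsp1 (by simp; omega)]
        have hfilt2 : rest.filter (fun q => decide (((sel ++ [p]).getLast?).getD 0 < q)) = rest := by
          rw [List.filter_eq_self]
          intro a ha
          rw [hlast1]
          simpa using hphead a ha
        rw [hfilt2]
        have : 5 - sel.length = (5 - (sel ++ [p]).length) + 1 := by simp; omega
        rw [this, List.take_succ_cons]
        simp
    · -- skip case
      have hne : sel ≠ [] := by rintro rfl; exact happ (Or.inl rfl)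
      have hnlt : ¬ (sel.getLast?).getD 0 < p := fun hlt => happ (Or.inr hlt)
      have hcond : (sel.isEmpty || decide (PySem.List.pyGetD sel (-1) 0 < p)) = false := by
        rw [PySem.List.pyGetD_neg_one sel 0 hne]
        rw [List.getLast?_eq_some_getLast hne] at hnlt
        simp only [Option.getD_some] at hnlt
        simp [hne, hnlt]
      rw [hcond]
      simp only [if_false, Bool.false_eq_true]
      rw [if_neg (by simp; omega)]
      rw [ih sel hprest (fun q hq => hpos q (by simp [hq])) hsp hlen]
      congr 2
      simp [hnlt]

-- ===== VERDICT (by name: the statement is the Claim_ definition above) =====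
theorem generate_set_from_scores_spec : Claim_equal_generate_set_from_scores := by
  intro scores _dom
  unfold Spec_generate_set_from_scores generate_set_from_scores generate_set_from_scores_alt
  dsimp only
  set items := (PySem.Dict.ofList scores).items with hitems
  set ranked := PySem.List.sorted items (fun x => -x.2) false with hranked
  have hkeysnd : (ranked.map (·.1)).Nodup := by
    have hperm : (ranked.map (·.1)).Perm (items.map (·.1)) :=
      (PySem.List.sorted_perm items _ _).map _
    rw [hperm.nodup_iff]
    have := PySem.Dict.nodup_keys_ofList (κ := Int) (ν := Int) scores
    simpa [PySem.Dict.keys] using this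
  have hA := pvSelLoop_spec ranked [] (by simp) (by simp) hkeysnd (by simp)
  simp only [List.nil_append, List.length_nil, Nat.sub_zero] at hA
  set S := PySem.List.sorted ((ranked.take 5).map (·.1)) (fun y => y) false with hS
  have hslice5 : PySem.List.slice ranked none (some 5) = ranked.take 5 := by
    rw [PySem.List.slice_to ranked (by norm_num)]
    rfl
  have hSnd : S.Nodup := by
    have hsub : ((ranked.take 5).map (·.1)).Sublist (ranked.map (·.1)) :=
      (List.take_sublist 5 ranked).map _
    exact ((PySem.List.sorted_perm _ _ _).nodup_iff).mpr (hsub.nodup hkeysnd)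
  have hSpw : S.Pairwise (· < ·) := by
    have hle := PySem.List.sorted_pairwise ((ranked.take 5).map (·.1)) (fun y => y)
    have hne : S.Pairwise (· ≠ ·) := hSnd
    exact (hle.and hne).imp (fun hab => lt_of_le_of_ne hab.1 hab.2)
  have hSlen : S.length ≤ 5 := by
    rw [hS, PySem.List.length_sorted, List.length_map]
    exact le_trans (List.length_take_le 5 ranked) (le_refl 5)
  rw [hA, hslice5, ← hS]
  by_cases hlt5 : S.length < 5
  · rw [if_pos hlt5, if_pos hlt5]
    set L := (S.getLast?).getD 0 with hL
    set remaining := (PySem.List.pyRange 1 40 1).filter (fun p => !(S.contains p)) with hrem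
    have hrempw : remaining.Pairwise (· < ·) :=
      (PySem.List.pairwise_lt_pyRange_one 1 40).filter _
    have hrempos : ∀ p ∈ remaining, 0 < p := by
      intro p hp
      rw [hrem, List.mem_filter] at hp
      have := (PySem.List.mem_pyRange_one).mp hp.1
      omega
    rw [pvFillLoop_spec remaining S hrempw hrempos hSpw hlt5]
    have hff : remaining.filter (fun p => decide (L < p)) =
        (PySem.List.pyRange 1 40 1).filter (fun p => decide (L < p)) := by
      rw [hrem, List.filter_filter]
      apply List.filter_congr
      intro a _
      by_cases hLa : L < a
      · have hnotin : a ∉ S := by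
          intro hin
          have := pv_le_getLast hSpw hin
          omega
        simp [hLa, hnotin]
      · simp [hLa]
    rw [hff, pv_filter_pyRange]
    set a := max (L + 1) 1 with ha
    rw [pv_take_pyRange]
    set c := min 40 (a + ((5 - S.length : Nat) : Int)) with hc
    -- B's start/stop coincide with a/c
    have hstart : (if (if S.isEmpty then 1 else PySem.List.pyGetD S (-1) 0 + 1) < 1 then 1
        else (if S.isEmpty then 1 else PySem.List.pyGetD S (-1) 0 + 1)) = a := by
      cases hse : S with
      | nil => simp [ha, hL, hse]
      | cons x xs =>
        rw [← hse]
        have hne : S ≠ [] := by rw [hse]; simp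
        have hie : S.isEmpty = false := by simp [hne]
        have hgl : (S.getLast?).getD 0 = S.getLast hne := by
          rw [List.getLast?_eq_some_getLast hne]; rfl
        rw [hL, hgl] at ha
        rw [PySem.List.pyGetD_neg_one S 0 hne, hie, ha]
        simp only [Bool.false_eq_true, if_false]
        split
        · rw [max_eq_right (by omega)]
        · rw [max_eq_left (by omega)]
    have hstop : min 40 (a + 5 - (S.length : Int)) = c := by
      rw [hc]
      congr 1
      omega
    have hLa : L < a := by rw [ha]; omega
    have hfillpw : (S ++ PySem.List.pyRange a c 1).Pairwise (· < ·) := by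
      refine List.pairwise_append.mpr ⟨hSpw, PySem.List.pairwise_lt_pyRange_one a c, ?_⟩
      intro x hx y hy
      have hx' := pv_le_getLast hSpw hx
      have hy' := (PySem.List.mem_pyRange_one).mp hy
      omega
    have hfilllen : (S ++ PySem.List.pyRange a c 1).length ≤ 5 := by
      rw [List.length_append, PySem.List.length_pyRange_one]
      have : c ≤ a + ((5 - S.length : Nat) : Int) := by rw [hc]; omega
      omega
    rw [PySem.List.sorted_eq_self_of_pairwise _ _ (hfillpw.imp le_of_lt),
      PySem.List.slice_to _ (by norm_num), List.take_of_length_le (by simpa using hfilllen)]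
    rw [hstart, hstop]
  · rw [if_neg hlt5, if_neg hlt5,
      PySem.List.sorted_eq_self_of_pairwise _ _ (hSpw.imp le_of_lt),
      PySem.List.slice_to _ (by norm_num), List.take_of_length_le (by simpa using hSlen)]
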